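-- pv_equiv track=rewrite | github.com/lreuss07/secintel-ai | trackers/defender/reporting_defender.py | _detect_licensing
-- ===== SOURCE A (Python) =====
-- def _detect_licensing(article):
--     """
--     Detect licensing requirements from article content.
--
--     Args:
--         article (dict): Article dictionary
--
--     Returns:
--         str: License tier or None
--     """
--     title = article.get('title', '').lower()
--     summary = article.get('summary', '').lower()
--     content = article.get('content', '').lower()
--     combined = f"{title} {summary} {content}"
--
--     # Check for specific license mentions
--     if any(keyword in combined for keyword in ['microsoft 365 e5', 'm365 e5', 'e5 license', 'e5 required']):
--         return 'E5'
--     elif any(keyword in combined for keyword in ['microsoft 365 e3', 'm365 e3', 'e3 license']):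
--         return 'E3'
--     elif any(keyword in combined for keyword in ['security copilot', 'copilot license']):
--         return 'Copilot'
--     elif any(keyword in combined for keyword in ['entra premium', 'entra id premium', 'p1 license', 'p2 license']):
--         return 'Entra Premium'
--     elif any(keyword in combined for keyword in ['intune license', 'endpoint manager license']):
--         return 'Intune License'
--     elif any(keyword in combined for keyword in ['add-on', 'additional license', 'separate license']):
--         return 'Add-on'
--     elif any(keyword in combined for keyword in ['included', 'no additional', 'all customers', 'all users']):
--         return 'Included'
--
--     return None
-- ===== SOURCE B (Python) =====
-- # Different algorithm: one left-to-right scan of the combined text, testing at every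
-- # position which keywords start there (multi-pattern position scan), collecting the
-- # set of matched tiers; the final answer is the highest-priority tier in that set.
-- _TIERS = ['E5', 'E3', 'Copilot', 'Entra Premium', 'Intune License', 'Add-on', 'Included']
--
-- _KEYWORDS = [
--     ('microsoft 365 e5', 0), ('m365 e5', 0), ('e5 license', 0), ('e5 required', 0),
--     ('microsoft 365 e3', 1), ('m365 e3', 1), ('e3 license', 1),
--     ('security copilot', 2), ('copilot license', 2),
--     ('entra premium', 3), ('entra id premium', 3), ('p1 license', 3), ('p2 license', 3),
--     ('intune license', 4), ('endpoint manager license', 4),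
--     ('add-on', 5), ('additional license', 5), ('separate license', 5),
--     ('included', 6), ('no additional', 6), ('all customers', 6), ('all users', 6),
-- ]
--
-- def _detect_licensing(article):
--     combined = " ".join(article.get(key, '').lower() for key in ('title', 'summary', 'content'))
--     found = set()
--     for pos in range(len(combined) + 1):
--         tail = combined[pos:]
--         for kw, tier in _KEYWORDS:
--             if tail.startswith(kw):
--                 found.add(tier)
--     for i, label in enumerate(_TIERS):
--         if i in found:
--             return label
--     return None
-- ===== Notes on version B (the rewrite author's own statement) =====
-- stated objective: alternative
-- what changed: Instead of running a substring search over the whole text per keyword in a seven-branch elif chain, B makes one positional scan of the combined text, at each position testing which keywords start there, accumulates the set of matched tier indices, and finally returns the first tier label whose index was found.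
import Mathlib
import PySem

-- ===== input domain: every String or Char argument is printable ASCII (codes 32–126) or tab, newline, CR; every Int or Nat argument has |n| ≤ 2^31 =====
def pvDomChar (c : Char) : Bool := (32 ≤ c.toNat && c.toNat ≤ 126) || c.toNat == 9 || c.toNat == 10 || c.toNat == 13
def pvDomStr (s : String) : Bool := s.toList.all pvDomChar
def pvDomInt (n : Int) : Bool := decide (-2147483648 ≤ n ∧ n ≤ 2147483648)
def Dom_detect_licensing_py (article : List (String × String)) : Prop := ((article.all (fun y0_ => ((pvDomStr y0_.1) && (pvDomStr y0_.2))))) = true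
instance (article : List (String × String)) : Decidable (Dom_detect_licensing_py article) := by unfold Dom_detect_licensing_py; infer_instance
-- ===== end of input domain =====

-- B replaces the per-keyword substring searches of the elif chain by one positional scan of
-- the combined text collecting the set of matched tiers; same result, no speed claim.

-- ===== PORT A =====
def detect_licensing_py (article : List (String × String)) : Option String :=
  let title := PySem.Str.lower (PySem.Dict.getD (PySem.Dict.ofList article) "title" "")
  let summary := PySem.Str.lower (PySem.Dict.getD (PySem.Dict.ofList article) "summary" "")
  let content := PySem.Str.lower (PySem.Dict.getD (PySem.Dict.ofList article) "content" "")
  let combined := title ++ " " ++ summary ++ " " ++ content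
  if ["microsoft 365 e5", "m365 e5", "e5 license", "e5 required"].any (fun k => PySem.Str.isIn k combined) then some "E5"
  else if ["microsoft 365 e3", "m365 e3", "e3 license"].any (fun k => PySem.Str.isIn k combined) then some "E3"
  else if ["security copilot", "copilot license"].any (fun k => PySem.Str.isIn k combined) then some "Copilot"
  else if ["entra premium", "entra id premium", "p1 license", "p2 license"].any (fun k => PySem.Str.isIn k combined) then some "Entra Premium"
  else if ["intune license", "endpoint manager license"].any (fun k => PySem.Str.isIn k combined) then some "Intune License"
  else if ["add-on", "additional license", "separate license"].any (fun k => PySem.Str.isIn k combined) then some "Add-on"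
  else if ["included", "no additional", "all customers", "all users"].any (fun k => PySem.Str.isIn k combined) then some "Included"
  else none

-- ===== PORT B =====
def pvTierLabels : List String :=
  ["E5", "E3", "Copilot", "Entra Premium", "Intune License", "Add-on", "Included"]

def pvKeywords : List (String × Int) :=
  [("microsoft 365 e5", 0), ("m365 e5", 0), ("e5 license", 0), ("e5 required", 0),
   ("microsoft 365 e3", 1), ("m365 e3", 1), ("e3 license", 1),
   ("security copilot", 2), ("copilot license", 2),
   ("entra premium", 3), ("entra id premium", 3), ("p1 license", 3), ("p2 license", 3),
   ("intune license", 4), ("endpoint manager license", 4),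
   ("add-on", 5), ("additional license", 5), ("separate license", 5),
   ("included", 6), ("no additional", 6), ("all customers", 6), ("all users", 6)]

-- inner loop: test every keyword against the tail starting at `pos`
def pvScanStep (combined : List Char) (found : PySem.Set Int) (pos : Int) : PySem.Set Int :=
  pvKeywords.foldl
    (fun acc p => if PySem.Chars.startswith (combined.drop pos.toNat) p.1.toList then PySem.Set.add acc p.2 else acc)
    found

-- outer loop: for pos in range(len(combined) + 1)
def pvFound (combined : List Char) : PySem.Set Int :=
  (PySem.List.pyRange 0 ((combined.length : Int) + 1) 1).foldl (pvScanStep combined) PySem.Set.empty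

-- final loop: first tier label whose index is in the found set
def pvPick (found : PySem.Set Int) : List (Int × String) → Option String
  | [] => none
  | (i, label) :: rest => if PySem.Set.contains found i then some label else pvPick found rest

def detect_licensing_py_alt (article : List (String × String)) : Option String :=
  let combined := PySem.Str.join " "
    (["title", "summary", "content"].map (fun key => PySem.Str.lower (PySem.Dict.getD (PySem.Dict.ofList article) key "")))
  pvPick (pvFound combined.toList) (PySem.List.enumerate pvTierLabels 0)

-- ===== PRECONDITION & SPEC =====
def Spec_detect_licensing_py (article : List (String × String)) (out : Option String) : Prop := out = detect_licensing_py_alt article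
instance (article : List (String × String)) (out : Option String) : Decidable (Spec_detect_licensing_py article out) := by unfold Spec_detect_licensing_py; infer_instance

-- ===== CLAIM (what is proved, stated in full; the proofs are below) =====
def Claim_equal_detect_licensing_py : Prop := ∀ (article : List (String × String)), Dom_detect_licensing_py article → Spec_detect_licensing_py article (detect_licensing_py article)

-- ===== LEMMAS AND PROOFS =====

theorem join_three (a b c : String) : PySem.Str.join " " [a, b, c] = a ++ " " ++ b ++ " " ++ c := by
  apply String.ext
  simp [PySem.Str.toList_join, PySem.Chars.join_cons_cons, PySem.Chars.join_singleton]

theorem mem_scanStep (combined : List Char) (found : PySem.Set Int) (pos : Int) (i : Int) :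
    i ∈ pvScanStep combined found pos ↔
      i ∈ found ∨ ∃ p ∈ pvKeywords, PySem.Chars.startswith (combined.drop pos.toNat) p.1.toList = true ∧ p.2 = i := by
  unfold pvScanStep
  generalize pvKeywords = ks
  induction ks generalizing found with
  | nil => simp
  | cons hd tl ih =>
    simp only [List.foldl_cons, ih, List.mem_cons]
    by_cases h : PySem.Chars.startswith (combined.drop pos.toNat) hd.1.toList = true
    · simp [h, PySem.Set.mem_add]
      try tauto
    · simp [h]
      try tauto

theorem mem_foldl_scan (combined : List Char) (ps : List Int) (found : PySem.Set Int) (i : Int) :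
    i ∈ ps.foldl (pvScanStep combined) found ↔
      i ∈ found ∨ ∃ pos ∈ ps, ∃ p ∈ pvKeywords,
        PySem.Chars.startswith (combined.drop pos.toNat) p.1.toList = true ∧ p.2 = i := by
  induction ps generalizing found with
  | nil => simp
  | cons hd tl ih =>
    simp only [List.foldl_cons, ih, mem_scanStep, List.mem_cons, or_and_right, exists_or,
      exists_eq_left]
    rw [or_assoc]

theorem mem_found (combined : List Char) (i : Int) :
    i ∈ pvFound combined ↔ ∃ p ∈ pvKeywords, p.2 = i ∧ PySem.Chars.isIn p.1.toList combined = true := by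
  unfold pvFound
  rw [mem_foldl_scan]
  constructor
  · rintro (h | ⟨pos, _, p, hp, hsw, hpi⟩)
    · simp [PySem.Set.empty] at h
    · refine ⟨p, hp, hpi, ?_⟩
      rw [← PySem.Chars.exists_prefix_drop_iff_isIn]
      exact ⟨pos.toNat, (PySem.Chars.startswith_iff _ _).1 hsw⟩
  · rintro ⟨p, hp, hpi, hin⟩
    right
    rw [← PySem.Chars.exists_prefix_drop_iff_isIn] at hin
    obtain ⟨j, hj⟩ := hin
    refine ⟨(min j combined.length : Nat), ?_, p, hp, ?_, hpi⟩
    · rw [PySem.List.mem_pyRange_one]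
      constructor
      · exact_mod_cast Nat.zero_le _
      · have : min j combined.length ≤ combined.length := Nat.min_le_right _ _
        omega
    · rw [PySem.Chars.startswith_iff]
      have htn : ((min j combined.length : Nat) : Int).toNat = min j combined.length := by omega
      rw [htn]
      rcases Nat.le_total j combined.length with h | h
      · rwa [Nat.min_eq_left h]
      · rw [Nat.min_eq_right h]
        have h1 : combined.drop j = [] := List.drop_eq_nil_of_le h
        have h2 : combined.drop combined.length = [] := by simp
        rw [h2]; rw [h1] at hj; exact hj

-- Bool-level: tier i was found iff some of its keywords is a substring of combined
theorem contains_found (combined : String) (i : Int) (kws : List String)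
    (h : (∃ p ∈ pvKeywords, p.2 = i ∧ PySem.Chars.isIn p.1.toList combined.toList = true) ↔
         (kws.any (fun k => PySem.Str.isIn k combined) = true)) :
    PySem.Set.contains (pvFound combined.toList) i = kws.any (fun k => PySem.Str.isIn k combined) := by
  rw [Bool.eq_iff_iff, PySem.Set.contains_iff, mem_found, h]

-- ===== VERDICT (by name: the statement is the Claim_ definition above) =====
theorem detect_licensing_py_spec : Claim_equal_detect_licensing_py := by
  intro article _
  unfold Spec_detect_licensing_py detect_licensing_py detect_licensing_py_alt
  simp only [List.map, join_three]
  generalize (PySem.Str.lower (PySem.Dict.getD (PySem.Dict.ofList article) "title" "") ++ " " ++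
    PySem.Str.lower (PySem.Dict.getD (PySem.Dict.ofList article) "summary" "") ++ " " ++
    PySem.Str.lower (PySem.Dict.getD (PySem.Dict.ofList article) "content" "")) = combined
  simp only [pvTierLabels, PySem.List.enumerate, pvPick]
  norm_num only
  rw [contains_found combined 0 ["microsoft 365 e5", "m365 e5", "e5 license", "e5 required"] (by simp [pvKeywords]; try tauto),
      contains_found combined 1 ["microsoft 365 e3", "m365 e3", "e3 license"] (by simp [pvKeywords]; try tauto),
      contains_found combined 2 ["security copilot", "copilot license"] (by simp [pvKeywords]; try tauto),
      contains_found combined 3 ["entra premium", "entra id premium", "p1 license", "p2 license"] (by simp [pvKeywords]; try tauto),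
      contains_found combined 4 ["intune license", "endpoint manager license"] (by simp [pvKeywords]; try tauto),
      contains_found combined 5 ["add-on", "additional license", "separate license"] (by simp [pvKeywords]; try tauto),
      contains_found combined 6 ["included", "no additional", "all customers", "all users"] (by simp [pvKeywords]; try tauto)]
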